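-- pv_equiv track=rewrite | github.com/nidolight/codingTestPractice | greedy/1.py | solution
-- ===== SOURCE A (Python) =====
-- def solution(N,adventurer):
--     adventurer.sort()
--     cnt = sum = 0
--
--     for a in adventurer:
--         sum+=1
--         if sum == a:
--             cnt+=1
--             sum=0
--
--     return cnt
-- ===== SOURCE B (Python) =====
-- def solution(N, adventurer):
--     # Count each fear value once, then walk the distinct fear values in
--     # increasing order, handling each block of equal values with one
--     # arithmetic step (division/modulo) instead of element by element.
--     counts = {}
--     for a in adventurer:
--         counts[a] = counts.get(a, 0) + 1
--     cnt = 0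
--     r = 0  # members accumulated toward the current group
--     for a in sorted(counts):
--         c = counts[a]
--         if r < a and r + c >= a:
--             rem = c - (a - r)
--             cnt += 1 + rem // a
--             r = rem % a
--         else:
--             r += c
--     return cnt
-- ===== Notes on version B (the rewrite author's own statement) =====
-- stated objective: alternative
-- what changed: B replaces A's per-element greedy pass over the fully sorted list by a counting pass (dict of multiplicities) followed by one arithmetic step (division/modulo) per distinct fear value in sorted order; it trades the element-by-element loop for block arithmetic over distinct values.
import Mathlib
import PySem

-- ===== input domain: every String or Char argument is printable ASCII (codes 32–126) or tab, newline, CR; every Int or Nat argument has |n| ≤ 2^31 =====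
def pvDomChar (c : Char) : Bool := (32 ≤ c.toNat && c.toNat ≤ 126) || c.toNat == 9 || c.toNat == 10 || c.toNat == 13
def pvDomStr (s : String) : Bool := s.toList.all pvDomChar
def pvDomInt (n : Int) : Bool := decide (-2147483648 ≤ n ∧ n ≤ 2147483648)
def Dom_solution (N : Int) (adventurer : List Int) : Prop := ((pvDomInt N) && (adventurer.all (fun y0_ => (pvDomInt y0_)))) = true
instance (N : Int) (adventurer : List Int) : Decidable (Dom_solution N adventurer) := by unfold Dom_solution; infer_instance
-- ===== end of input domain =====

-- B is an alternative algorithm: it counts multiplicities once and does one arithmetic step per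
-- distinct fear value in sorted order, where A does one step per adventurer over the fully sorted
-- list (equal RETURN values; Python A sorts `adventurer` in place, B leaves it untouched — the
-- claim here is about the return value only).

-- ===== PORT A =====
-- A's loop body: sum += 1; if sum == a: cnt += 1; sum = 0   (state = (cnt, sum))
def stepA (st : Int × Int) (a : Int) : Int × Int :=
  let s := st.2 + 1
  if s = a then (st.1 + 1, 0) else (st.1, s)

def solution (N : Int) (adventurer : List Int) : Int :=
  ((PySem.List.sorted adventurer (fun x => x) false).foldl stepA (0, 0)).1

-- ===== PORT B =====
-- B's loop body for a distinct value a with multiplicity c (state = (cnt, r))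
def stepB (a c : Int) (st : Int × Int) : Int × Int :=
  if st.2 < a ∧ a ≤ st.2 + c then
    (st.1 + 1 + PySem.Int.floordiv (c - (a - st.2)) a,
     PySem.Int.mod (c - (a - st.2)) a)
  else (st.1, st.2 + c)

def solution_alt (N : Int) (adventurer : List Int) : Int :=
  let counts := PySem.Dict.counter adventurer
  ((PySem.List.sorted counts.keys (fun x => x) false).foldl
      (fun st a => stepB a (counts.getD a 0) st) (0, 0)).1

-- ===== PRECONDITION & SPEC =====
def Spec_solution (N : Int) (adventurer : List Int) (out : Int) : Prop := out = solution_alt N adventurer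
instance (N : Int) (adventurer : List Int) (out : Int) : Decidable (Spec_solution N adventurer out) := by unfold Spec_solution; infer_instance

-- ===== CLAIM (what is proved, stated in full; the proofs are below) =====
def Claim_equal_solution : Prop := ∀ (N : Int) (adventurer : List Int), Dom_solution N adventurer → Spec_solution N adventurer (solution N adventurer)

-- ===== LEMMAS AND PROOFS =====

-- one B step over a block of c equal values equals c A steps, provided the carry is ≥ 0
theorem stepB_succ (a : Int) (c : Nat) (st : Int × Int) (hr : 0 ≤ st.2) :
    stepB a ((c : Int) + 1) st = stepB a (c : Int) (stepA st a) := by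
  obtain ⟨k, r⟩ := st
  simp only [stepA, stepB]
  rcases eq_or_ne (r + 1) a with ha | ha
  · have hapos : 0 < a := by omega
    rw [if_pos (by omega : r < a ∧ a ≤ r + ((c:Int) + 1))]
    simp only [if_pos ha]
    by_cases hc : a ≤ (c : Int)
    · rw [if_pos (by simpa using ⟨hapos, hc⟩)]
      have h1 : (c:Int) + 1 - (a - r) = (c:Int) := by omega
      have h2 : (c:Int) - (a - 0) = (c:Int) - a := by ring
      rw [h1, h2]
      simp only [PySem.Int.floordiv_eq_ediv_of_pos hapos, PySem.Int.mod_eq_emod_of_pos hapos,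
        Prod.mk.injEq]
      constructor
      · rw [show (c:Int) - a = (c:Int) + (-1) * a by ring,
          Int.add_mul_ediv_right _ _ (by omega : a ≠ 0)]
        ring
      · rw [show (c:Int) - a = (c:Int) + (-1) * a by ring,
          Int.add_mul_emod_self_right]
    · rw [if_neg (by simp; omega)]
      have h1 : (c:Int) + 1 - (a - r) = (c:Int) := by omega
      rw [h1]
      simp only [PySem.Int.floordiv_eq_ediv_of_pos hapos, PySem.Int.mod_eq_emod_of_pos hapos,
        Int.ediv_eq_zero_of_lt (by omega : (0:Int) ≤ (c:Int)) (by omega : (c:Int) < a),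
        Int.emod_eq_of_lt (by omega : (0:Int) ≤ (c:Int)) (by omega : (c:Int) < a),
        Prod.mk.injEq]
      constructor <;> ring
  · simp only [if_neg ha]
    by_cases hcond : r < a ∧ a ≤ r + ((c:Int) + 1)
    · rw [if_pos hcond, if_pos (by omega)]
      simp only [Prod.mk.injEq]
      constructor
      · congr 2; omega
      · congr 1; omega
    · rw [if_neg hcond, if_neg (by omega)]
      simp only [Prod.mk.injEq]
      exact ⟨trivial, by omega⟩

theorem foldl_stepA_replicate (a : Int) (c : Nat) (st : Int × Int) (hr : 0 ≤ st.2) :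
    (List.replicate c a).foldl stepA st = stepB a (c : Int) st := by
  induction c generalizing st with
  | zero =>
    simp only [List.replicate, List.foldl_nil, Nat.cast_zero, stepB]
    rw [if_neg (by omega)]
    simp
  | succ n ih =>
    have hr' : 0 ≤ (stepA st a).2 := by
      simp only [stepA]
      split_ifs
      · simp
      · simp; omega
    rw [List.replicate_succ, List.foldl_cons, ih _ hr']
    rw [Nat.cast_add, Nat.cast_one, stepB_succ a n st hr]

theorem stepB_snd_nonneg (a c : Int) (st : Int × Int) (hc : 0 ≤ c) (hr : 0 ≤ st.2) :
    0 ≤ (stepB a c st).2 := by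
  simp only [stepB]
  split_ifs with h
  · exact PySem.Int.mod_nonneg _ (by omega)
  · simp; omega

theorem count_flatMap_rep (xs : List Int) (L : List Int) (hN : L.Nodup) (b : Int) :
    ((L.flatMap (fun a => List.replicate (xs.count a) a)).count b)
      = if b ∈ L then xs.count b else 0 := by
  induction L with
  | nil => simp
  | cons a t ih =>
    simp only [List.flatMap_cons, List.count_append, List.count_replicate, List.mem_cons]
    rw [ih hN.of_cons]
    rcases eq_or_ne b a with rfl | hne
    · have : b ∉ t := (List.nodup_cons.mp hN).1
      simp [this]
    · simp [hne, hne.symm]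

theorem pairwise_flatMap_rep (xs L : List Int) (hL : L.Pairwise (· < ·)) :
    (L.flatMap (fun a => List.replicate (xs.count a) a)).Pairwise (fun a b => a ≤ b) := by
  induction L with
  | nil => simp
  | cons a t ih =>
    simp only [List.flatMap_cons]
    rw [List.pairwise_append]
    refine ⟨List.pairwise_replicate.mpr ?_, ih hL.of_cons, ?_⟩
    · simp
    · intro x hx y hy
      rw [List.eq_of_mem_replicate hx]
      obtain ⟨z, hz, hy2⟩ := List.mem_flatMap.mp hy
      rw [List.eq_of_mem_replicate hy2]
      exact le_of_lt ((List.pairwise_cons.mp hL).1 z hz)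

-- sorted(xs) is the concatenation of the blocks of equal values along the sorted distinct values
theorem sorted_eq_flatMap (xs : List Int) :
    PySem.List.sorted xs (fun x => x) false =
      (PySem.List.sorted (PySem.Set.ofList xs) (fun x => x) false).flatMap
        (fun a => List.replicate (xs.count a) a) := by
  set L := PySem.List.sorted (PySem.Set.ofList xs) (fun x => x) false with hLdef
  have hLperm : L.Perm (PySem.Set.ofList xs) := PySem.List.sorted_perm _ _ _
  have hN : L.Nodup := hLperm.nodup_iff.mpr (PySem.Set.nodup_ofList xs)
  have hm : ∀ x, x ∈ L ↔ x ∈ xs := by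
    intro x
    rw [hLperm.mem_iff]
    exact PySem.Set.mem_ofList (xs := xs) (y := x)
  have hP : L.Pairwise (fun a b => (a : Int) < b) := PySem.List.sorted_ofList_pairwise_lt xs
  apply PySem.List.sorted_id_eq_of_perm_of_pairwise
  · rw [List.perm_iff_count]
    intro b
    rw [count_flatMap_rep xs L hN b]
    by_cases hb : b ∈ L
    · simp [hb]
    · have : b ∉ xs := fun h => hb ((hm b).2 h)
      simp [hb, List.count_eq_zero_of_not_mem this]
  · exact pairwise_flatMap_rep xs L hP

-- the key-wise fold of blocks of A's step equals the fold of B's step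
theorem key_fold (xs : List Int) (L : List Int) (st : Int × Int) (hr : 0 ≤ st.2) :
    L.foldl (fun s a => (List.replicate (xs.count a) a).foldl stepA s) st
      = L.foldl (fun s a => stepB a ((xs.count a : Nat) : Int) s) st := by
  induction L generalizing st with
  | nil => rfl
  | cons a t ih =>
    simp only [List.foldl_cons]
    rw [foldl_stepA_replicate a (xs.count a) st hr]
    exact ih _ (stepB_snd_nonneg _ _ _ (by positivity) hr)

-- ===== VERDICT (by name: the statement is the Claim_ definition above) =====
theorem solution_spec : Claim_equal_solution := by
  intro N xs _
  show solution N xs = solution_alt N xs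
  unfold solution solution_alt
  simp only [PySem.Dict.keys_counter, PySem.Dict.getD_counter]
  rw [sorted_eq_flatMap xs, List.foldl_flatMap,
    key_fold xs _ (0, 0) (by simp)]
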